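-- pv_equiv track=rewrite | github.com/googlefonts/glyphsLib | Lib/glyphsLib/builder/names.py | _get_linked_style
-- ===== SOURCE A (Python) =====
-- from collections import deque
--
-- def _get_linked_style(style_name, is_bold, is_italic):
--     # strip last occurrence of 'Regular', 'Bold', 'Italic' from style_name
--     # depending on the values of is_bold and is_italic
--     linked_style = deque()
--     is_regular = not (is_bold or is_italic)
--     for part in reversed(style_name.split()):
--         if part == 'Regular' and is_regular:
--             is_regular = False
--         elif part == 'Bold' and is_bold:
--             is_bold = False
--         elif part == 'Italic' and is_italic:
--             is_italic = False
--         else: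
--             linked_style.appendleft(part)
--     return ' '.join(linked_style)
-- ===== SOURCE B (Python) =====
-- def _drop_last(words, kw):
--     # remove the last occurrence of kw from words, if present
--     if kw in words:
--         j = len(words) - 1 - words[::-1].index(kw)
--         return words[:j] + words[j + 1:]
--     return words
--
-- def _get_linked_style(style_name, is_bold, is_italic):
--     words = style_name.split()
--     if not (is_bold or is_italic):
--         words = _drop_last(words, 'Regular')
--     if is_bold:
--         words = _drop_last(words, 'Bold')
--     if is_italic:
--         words = _drop_last(words, 'Italic')
--     return ' '.join(words)
-- ===== Notes on version B (the rewrite author's own statement) =====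
-- stated objective: alternative
-- what changed: Replaces A's single reverse scan with three mutable flags and a deque by three independent 'delete the last occurrence of the keyword' steps (rindex plus list slicing) applied only for the active flags, then one join.
import Mathlib
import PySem

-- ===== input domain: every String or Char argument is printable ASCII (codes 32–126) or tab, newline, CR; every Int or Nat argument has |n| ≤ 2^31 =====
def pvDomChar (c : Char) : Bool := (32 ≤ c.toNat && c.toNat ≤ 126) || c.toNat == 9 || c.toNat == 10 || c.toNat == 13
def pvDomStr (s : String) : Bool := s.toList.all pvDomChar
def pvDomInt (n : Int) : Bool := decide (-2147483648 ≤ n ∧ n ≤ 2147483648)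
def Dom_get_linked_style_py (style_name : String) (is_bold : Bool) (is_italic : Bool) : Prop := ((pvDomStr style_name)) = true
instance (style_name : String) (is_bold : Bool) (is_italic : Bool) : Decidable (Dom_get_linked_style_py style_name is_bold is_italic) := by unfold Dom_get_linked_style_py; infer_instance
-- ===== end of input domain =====

-- B replaces A's single reverse stateful scan by three independent
-- "delete the last occurrence" slice steps (rindex + concatenation); objective: alternative decomposition.


-- ===== PORT A =====
-- the 'for part in reversed(...)' loop; deque.appendleft = cons onto the accumulator
def pyALoop : List String → Bool → Bool → Bool → List String → List String
  | [], _, _, _, acc => acc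
  | p :: rest, is_regular, is_bold, is_italic, acc =>
    if p = "Regular" ∧ is_regular then pyALoop rest false is_bold is_italic acc
    else if p = "Bold" ∧ is_bold then pyALoop rest is_regular false is_italic acc
    else if p = "Italic" ∧ is_italic then pyALoop rest is_regular is_bold false acc
    else pyALoop rest is_regular is_bold is_italic (p :: acc)

def get_linked_style_py (style_name : String) (is_bold : Bool) (is_italic : Bool) : String :=
  PySem.Str.join " "
    (pyALoop (PySem.Str.split₀ style_name).reverse (!(is_bold || is_italic)) is_bold is_italic [])

-- ===== PORT B =====
-- words[::-1] is List.reverse (PySem.List.slice?_none_none_neg_one); .index is guarded by the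
-- membership test, so the ValueError branch is unreachable and getD 0 is never used.
def pyDropLast (words : List String) (kw : String) : List String :=
  if kw ∈ words then
    let j : Int := (words.length : Int) - 1 - ((PySem.List.index? words.reverse kw).getD 0 : Nat)
    PySem.List.slice words none (some j) ++ PySem.List.slice words (some (j + 1)) none
  else words

def get_linked_style_py_alt (style_name : String) (is_bold : Bool) (is_italic : Bool) : String :=
  let w0 := PySem.Str.split₀ style_name
  let w1 := if !(is_bold || is_italic) then pyDropLast w0 "Regular" else w0
  let w2 := if is_bold then pyDropLast w1 "Bold" else w1
  let w3 := if is_italic then pyDropLast w2 "Italic" else w2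
  PySem.Str.join " " w3

-- ===== PRECONDITION & SPEC =====
def Spec_get_linked_style_py (style_name : String) (is_bold : Bool) (is_italic : Bool) (out : String) : Prop := out = get_linked_style_py_alt style_name is_bold is_italic
instance (style_name : String) (is_bold : Bool) (is_italic : Bool) (out : String) : Decidable (Spec_get_linked_style_py style_name is_bold is_italic out) := by unfold Spec_get_linked_style_py; infer_instance

-- ===== CLAIM (what is proved, stated in full; the proofs are below) =====
def Claim_equal_get_linked_style_py : Prop := ∀ (style_name : String) (is_bold : Bool) (is_italic : Bool), Dom_get_linked_style_py style_name is_bold is_italic → Spec_get_linked_style_py style_name is_bold is_italic (get_linked_style_py style_name is_bold is_italic)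

-- ===== LEMMAS AND PROOFS =====

-- A's loop with the accumulator unrolled: keep the parts of the (reversed) word list,
-- dropping the first occurrence of each still-active keyword.
def eraseA : List String → Bool → Bool → Bool → List String
  | [], _, _, _ => []
  | p :: rest, r, b, i =>
    if p = "Regular" ∧ r then eraseA rest false b i
    else if p = "Bold" ∧ b then eraseA rest r false i
    else if p = "Italic" ∧ i then eraseA rest r b false
    else p :: eraseA rest r b i

-- conditional first-occurrence erase
def ef (kw : String) (a : Bool) (l : List String) : List String := if a then l.erase kw else l

theorem pyALoop_eq (l : List String) : ∀ (r b i : Bool) (acc : List String),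
    pyALoop l r b i acc = (eraseA l r b i).reverse ++ acc := by
  induction l with
  | nil => intro r b i acc; simp [pyALoop, eraseA]
  | cons p rest ih =>
    intro r b i acc
    simp only [pyALoop, eraseA]
    split_ifs <;> simp [ih]

theorem eraseA_eq (l : List String) : ∀ (r b i : Bool),
    eraseA l r b i = ef "Italic" i (ef "Bold" b (ef "Regular" r l)) := by
  induction l with
  | nil => intro r b i; simp [eraseA, ef]
  | cons p rest ih =>
    intro r b i
    simp only [eraseA]
    split_ifs with h1 h2 h3
    · obtain ⟨hp, hr⟩ := h1; subst hp
      cases b <;> cases i <;> simp_all [ef]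
    · obtain ⟨hp, hb⟩ := h2; subst hp
      cases r <;> cases i <;> simp_all [ef]
    · obtain ⟨hp, hi⟩ := h3; subst hp
      cases r <;> cases b <;> simp_all [ef]
    · rw [ih]
      cases r <;> cases b <;> cases i <;> simp_all [ef]

theorem pyDropLast_eq (ws : List String) (kw : String) :
    pyDropLast ws kw = (ws.reverse.erase kw).reverse := by
  unfold pyDropLast
  by_cases hm : kw ∈ ws
  · simp only [hm, if_true]
    have hmr : kw ∈ ws.reverse := by simpa using hm
    have hsome : (PySem.List.index? ws.reverse kw).isSome := by
      rw [PySem.List.index?_isSome_iff]; exact hmr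
    obtain ⟨k, hk⟩ := Option.isSome_iff_exists.mp hsome
    obtain ⟨pre, suf, hdec, hlen, hnp⟩ := (PySem.List.index?_eq_some_iff _ _ _).mp hk
    have hws : ws = suf.reverse ++ kw :: pre.reverse := by
      have := congrArg List.reverse hdec
      simpa using this
    have hn : ws.length = pre.length + suf.length + 1 := by
      rw [hws]; simp; omega
    have hj : ((ws.length : Int) - 1 - ((PySem.List.index? ws.reverse kw).getD 0 : Nat))
        = (suf.length : Int) := by
      rw [hk, hn, ← hlen]; simp only [Option.getD_some]; push_cast; omega
    rw [hk] at hj ⊢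
    simp only [hj]
    have h1 : PySem.List.slice ws none (some (suf.length : Int)) = suf.reverse := by
      rw [PySem.List.slice_to ws (by positivity)]
      rw [hws]
      simp [List.take_left']
    have h2 : PySem.List.slice ws (some ((suf.length : Int) + 1)) none = pre.reverse := by
      rw [PySem.List.slice_from ws (by positivity)]
      have : ws = (suf.reverse ++ [kw]) ++ pre.reverse := by rw [hws]; simp
      rw [this]
      rw [List.drop_left' (by simp)]
    rw [h1, h2]
    have herase : ws.reverse.erase kw = pre ++ suf := by
      rw [hdec, List.erase_append_right _ hnp, List.erase_cons_head]
    rw [herase]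
    simp
  · simp only [hm, if_false]
    have : kw ∉ ws.reverse := by simpa using hm
    rw [List.erase_of_not_mem this]
    simp

theorem ef_reverse (kw : String) (a : Bool) (ws : List String) :
    (if a then pyDropLast ws kw else ws) = (ef kw a ws.reverse).reverse := by
  cases a <;> simp [ef, pyDropLast_eq]

-- ===== VERDICT (by name: the statement is the Claim_ definition above) =====
theorem get_linked_style_py_spec : Claim_equal_get_linked_style_py := by
  intro style_name is_bold is_italic _
  unfold Spec_get_linked_style_py get_linked_style_py get_linked_style_py_alt
  rw [pyALoop_eq, eraseA_eq]
  simp only [ef_reverse]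
  simp
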